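-- pv_equiv track=rewrite | github.com/johnamcruz/algoTraderAI | algoTrader.py | parse_future_symbol
-- ===== SOURCE A (Python) =====
-- MICRO_TO_MINI_MAP = {
--     # Indices
--     "MNQ": "NQ",  # Micro E-mini Nasdaq-100
--     "MES": "ES",  # Micro E-mini S&P 500
--     "MYM": "YM",  # Micro E-mini Dow
--     "M2K": "RTY", # Micro E-mini Russell 2000
--
--     # Metals
--     "MGC": "GC",  # Micro Gold
--     "SIL": "SI",  # Micro Silver (Note: Parent is SI, not SIZ)
--     "MHG": "HG",  # Micro Copper
--
--     # Energy
--     "MCL": "CL",  # Micro WTI Crude Oil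
--     "MNG": "NG",  # Micro Henry Hub Natural Gas
--
--     # Crypto
--     "MBT": "BTC", # Micro Bitcoin
--     "MET": "ETH", # Micro Ether
--
--     # Micro FX (Maps to their E-Micro parent, e.g., M6E -> 6E)
--     "M6A": "6A",
--     "M6B": "6B",
--     "M6E": "6E",
--     # Note: 'E7' is already an E-mini, not a micro.
-- }
--
-- def parse_future_symbol(contract_name):
--     """
--     Parses the base future symbol from a contract name (e.g., "MNQZ5")
--     and dynamically maps known Micro contracts to their parent symbol
--     (e.g., "NQ", "ES", "GC").
--     """
--     if not contract_name:
--         return None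
--
--     # 1. Get the abbreviated core part (e.g., "MNQZ5")
--     name_field = contract_name.upper().split('.')[-1]
--
--     # 2. Find the split point between the symbol and the expiry code.
--     # We find the index of the *first digit* (the year).
--     first_digit_index = -1
--     for i, char in enumerate(name_field):
--         if char.isdigit():
--             first_digit_index = i
--             break
--
--     if first_digit_index == -1:
--         # No digit found, assume it's just the symbol (e.g., "BTC")
--         base_symbol_with_month = name_field
--     else:
--         # We have the part before the year (e.g., "NQZ", "MGCZ", "6BZ")
--         base_symbol_with_month = name_field[:first_digit_index]
--
--     # 3. Strip the month code (the last letter)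
--     month_codes = "FGHJKMNQUVXZ"
--     base_symbol = base_symbol_with_month
--
--     if base_symbol and base_symbol[-1] in month_codes:
--         base_symbol = base_symbol[:-1] # "NQZ" -> "NQ", "MGCZ" -> "MGC"
--
--     # 4. Apply the Micro-to-Mini mapping
--     if base_symbol in MICRO_TO_MINI_MAP:
--         return MICRO_TO_MINI_MAP[base_symbol]
--
--     # 5. Return the parsed base symbol if not in the map
--     return base_symbol
-- ===== SOURCE B (Python) =====
-- MICRO_TO_MINI_MAP = {
--     "MNQ": "NQ", "MES": "ES", "MYM": "YM", "M2K": "RTY",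
--     "MGC": "GC", "SIL": "SI", "MHG": "HG",
--     "MCL": "CL", "MNG": "NG",
--     "MBT": "BTC", "MET": "ETH",
--     "M6A": "6A", "M6B": "6B", "M6E": "6E",
-- }
--
-- MONTH_CODES = set("FGHJKMNQUVXZ")
--
--
-- def parse_future_symbol(contract_name):
--     if not contract_name:
--         return None
--     name_field = contract_name.upper().split('.')[-1]
--     # collect the digit-free prefix directly (no index bookkeeping, no slices)
--     cs = []
--     for c in name_field:
--         if c.isdigit():
--             break
--         cs.append(c)
--     if cs and cs[-1] in MONTH_CODES:
--         cs.pop()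
--     base = ''.join(cs)
--     return MICRO_TO_MINI_MAP.get(base, base)
-- ===== Notes on version B (the rewrite author's own statement) =====
-- stated objective: simpler
-- what changed: Replaces the enumerate-based first-digit index scan with its -1 sentinel and two conditional slices by directly accumulating the digit-free prefix in one loop, a single conditional pop of the month code, and dict.get with a default instead of membership-test-then-index.
import Mathlib
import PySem

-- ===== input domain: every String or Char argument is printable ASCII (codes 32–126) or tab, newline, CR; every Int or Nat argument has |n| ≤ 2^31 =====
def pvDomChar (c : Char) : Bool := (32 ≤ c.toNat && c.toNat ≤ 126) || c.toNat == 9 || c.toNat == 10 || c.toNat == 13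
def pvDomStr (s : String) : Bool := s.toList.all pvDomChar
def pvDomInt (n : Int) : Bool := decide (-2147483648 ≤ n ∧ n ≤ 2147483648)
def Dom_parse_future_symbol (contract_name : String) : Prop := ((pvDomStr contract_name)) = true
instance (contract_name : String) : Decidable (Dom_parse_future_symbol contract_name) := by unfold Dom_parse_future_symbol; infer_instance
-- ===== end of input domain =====

-- B re-implements the first-digit scan + two slices as one structural recursion taking the
-- digit-free prefix, then a single conditional dropLast and a dict .get with default (objective: simpler).

-- MICRO_TO_MINI_MAP (module constant, shared by both sources)
def pvMicroMap : PySem.Dict String String :=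
  PySem.Dict.ofList [("MNQ","NQ"),("MES","ES"),("MYM","YM"),("M2K","RTY"),
    ("MGC","GC"),("SIL","SI"),("MHG","HG"),("MCL","CL"),("MNG","NG"),
    ("MBT","BTC"),("MET","ETH"),("M6A","6A"),("M6B","6B"),("M6E","6E")]

-- ===== PORT A =====
-- A's for-loop over enumerate(name_field) with break: index of the first digit, -1 if none
def pvA_firstDigit : List (Int × Char) → Int
  | [] => -1
  | (i, c) :: rest => if PySem.Chars.isdigit c then i else pvA_firstDigit rest

def parse_future_symbol (contract_name : String) : Option String :=
  if contract_name.toList = [] then none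
  else
    let name_field :=
      (PySem.List.pyGet? (PySem.Chars.splitOn (PySem.Chars.upper contract_name.toList) ['.']) (-1)).getD []
    let first_digit_index := pvA_firstDigit (PySem.List.enumerate name_field)
    let base_symbol_with_month :=
      if first_digit_index = -1 then name_field
      else PySem.List.slice name_field none (some first_digit_index)
    -- month_codes = "FGHJKMNQUVXZ"; `base_symbol[-1] in month_codes` is single-char substring membership
    let base_symbol :=
      if base_symbol_with_month ≠ [] ∧
         (PySem.List.pyGet? base_symbol_with_month (-1)).getD ' ' ∈ "FGHJKMNQUVXZ".toList
      then PySem.List.slice base_symbol_with_month none (some (-1))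
      else base_symbol_with_month
    match pvMicroMap.get? (String.ofList base_symbol) with
    | some v => some v
    | none => some (String.ofList base_symbol)

-- ===== PORT B =====
-- MONTH_CODES = set("FGHJKMNQUVXZ")
def pvMonthSet : PySem.Set Char := PySem.Set.ofList "FGHJKMNQUVXZ".toList

-- Source B's for-loop with break: accumulate the digit-free prefix
def pvB_take (out : List Char) : List Char → List Char
  | [] => out
  | c :: rest => if PySem.Chars.isdigit c then out else pvB_take (out ++ [c]) rest

def parse_future_symbol_alt (contract_name : String) : Option String :=
  if contract_name.toList = [] then none
  else
    let name_field :=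
      (PySem.List.pyGet? (PySem.Chars.splitOn (PySem.Chars.upper contract_name.toList) ['.']) (-1)).getD []
    let cs := pvB_take [] name_field
    let cs' := if cs ≠ [] ∧ cs.getLast?.getD ' ' ∈ pvMonthSet then cs.dropLast else cs
    some (pvMicroMap.getD (String.ofList cs') (String.ofList cs'))

-- ===== PRECONDITION & SPEC =====
def Spec_parse_future_symbol (contract_name : String) (out : Option String) : Prop := out = parse_future_symbol_alt contract_name
instance (contract_name : String) (out : Option String) : Decidable (Spec_parse_future_symbol contract_name out) := by unfold Spec_parse_future_symbol; infer_instance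

-- ===== CLAIM (what is proved, stated in full; the proofs are below) =====
def Claim_equal_parse_future_symbol : Prop := ∀ (contract_name : String), Dom_parse_future_symbol contract_name → Spec_parse_future_symbol contract_name (parse_future_symbol contract_name)

-- ===== LEMMAS AND PROOFS =====

-- B's accumulator loop is takeWhile (not a digit)
theorem pvB_take_eq (out cs : List Char) :
    pvB_take out cs = out ++ cs.takeWhile (fun c => !PySem.Chars.isdigit c) := by
  induction cs generalizing out with
  | nil => simp [pvB_take]
  | cons c rest ih =>
    simp only [pvB_take, List.takeWhile_cons]
    by_cases h : PySem.Chars.isdigit c <;> simp [h, ih]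

-- characterisation of A's first-digit scan
theorem pvA_firstDigit_spec (cs : List Char) (s : Int) :
    pvA_firstDigit (PySem.List.enumerate cs s) =
      if (cs.takeWhile (fun c => !PySem.Chars.isdigit c)).length = cs.length then -1
      else s + (cs.takeWhile (fun c => !PySem.Chars.isdigit c)).length := by
  induction cs generalizing s with
  | nil => simp [PySem.List.enumerate_nil, pvA_firstDigit]
  | cons c rest ih =>
    rw [PySem.List.enumerate_cons]
    simp only [pvA_firstDigit, List.takeWhile_cons]
    by_cases h : PySem.Chars.isdigit c
    · simp [h]
    · have hle : (rest.takeWhile (fun c => !PySem.Chars.isdigit c)).length ≤ rest.length :=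
        (List.takeWhile_prefix _).length_le
      rw [if_neg h, ih (s + 1)]
      by_cases hl : (rest.takeWhile (fun c => !PySem.Chars.isdigit c)).length = rest.length
      · simp [h, hl]
      · simp only [h, Bool.not_false, if_true, List.length_cons, if_neg hl]
        rw [if_neg (by omega : ¬ ((rest.takeWhile (fun c => !PySem.Chars.isdigit c)).length + 1 = rest.length + 1))]
        push_cast
        ring

theorem pv_pyGet_neg_one {α : Type} (xs : List α) : PySem.List.pyGet? xs (-1) = xs.getLast? := by
  cases xs with
  | nil => rfl
  | cons a l => simp [PySem.List.pyGet?, PySem.List.pyIdx?, List.getLast?_eq_getElem?]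

theorem pv_slice_neg_one {α : Type} (xs : List α) :
    PySem.List.slice xs none (some (-1)) = xs.dropLast := by
  cases xs with
  | nil => rfl
  | cons a l =>
    simp [PySem.List.slice, PySem.List.clampIdx, List.dropLast_eq_take]
    split_ifs <;> omega

-- A's prefix computation (scan + slice) equals B's takeWhile recursion
theorem pv_prefix_eq (cs : List Char) :
    (if pvA_firstDigit (PySem.List.enumerate cs) = -1 then cs
     else PySem.List.slice cs none (some (pvA_firstDigit (PySem.List.enumerate cs)))) =
    pvB_take [] cs := by
  rw [pvB_take_eq, List.nil_append]
  have h := pvA_firstDigit_spec cs 0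
  set tw := cs.takeWhile (fun c => !PySem.Chars.isdigit c) with htw
  have hpre : tw <+: cs := List.takeWhile_prefix _
  have hle : tw.length ≤ cs.length := hpre.length_le
  rw [h]
  by_cases hl : tw.length = cs.length
  · rw [if_pos hl, if_pos rfl]
    exact (List.IsPrefix.eq_of_length hpre hl).symm
  · rw [if_neg hl, if_neg (by omega : ¬ ((0 : Int) + tw.length = -1)),
        PySem.List.slice_to _ (by omega)]
    have h2 : ((0 : Int) + tw.length).toNat = tw.length := by omega
    rw [h2]
    exact (List.prefix_iff_eq_take.mp hpre).symm

-- the month-code strip steps agree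
theorem pv_strip_eq (cs : List Char) :
    (if cs ≠ [] ∧ (PySem.List.pyGet? cs (-1)).getD ' ' ∈ "FGHJKMNQUVXZ".toList
     then PySem.List.slice cs none (some (-1)) else cs) =
    (if cs ≠ [] ∧ cs.getLast?.getD ' ' ∈ pvMonthSet then cs.dropLast else cs) := by
  rw [pv_pyGet_neg_one, pv_slice_neg_one]
  have : (cs.getLast?.getD ' ' ∈ pvMonthSet) ↔ (cs.getLast?.getD ' ' ∈ "FGHJKMNQUVXZ".toList) := by
    exact PySem.Set.mem_ofList _ _
  by_cases h : cs ≠ [] ∧ cs.getLast?.getD ' ' ∈ "FGHJKMNQUVXZ".toList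
  · rw [if_pos h, if_pos ⟨h.1, this.mpr h.2⟩]
  · rw [if_neg h, if_neg (fun hc => h ⟨hc.1, this.mp hc.2⟩)]

-- the final lookup steps agree
theorem pv_lookup_eq (b : List Char) :
    (match pvMicroMap.get? (String.ofList b) with
     | some v => some v
     | none => some (String.ofList b)) =
    some (pvMicroMap.getD (String.ofList b) (String.ofList b)) := by
  cases h : pvMicroMap.get? (String.ofList b) <;> simp [PySem.Dict.getD, h]

-- ===== VERDICT (by name: the statement is the Claim_ definition above) =====
theorem parse_future_symbol_spec : Claim_equal_parse_future_symbol := by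
  intro contract_name _
  unfold Spec_parse_future_symbol parse_future_symbol parse_future_symbol_alt
  by_cases h : contract_name.toList = []
  · simp [h]
  · simp only [h, if_false]
    set nf := (PySem.List.pyGet? (PySem.Chars.splitOn (PySem.Chars.upper contract_name.toList) ['.']) (-1)).getD []
    rw [pv_prefix_eq nf, pv_strip_eq (pvB_take [] nf), pv_lookup_eq]
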